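-- pv_equiv track=rewrite | github.com/Amine-te/VoxQuery | rag_engine.py | _rerank_tables
-- ===== SOURCE A (Python) =====
-- from typing import Dict, List, Optional
--
-- def _rerank_tables(tables_info: List[Dict], query: str) -> List[Dict]:
--     """Rerank retrieved tables based on exact name matches"""
--     query_words = set(query.lower().split())
--
--     # Separate exact matches and non-matches
--     exact_matches = []
--     other_matches = []
--
--     for table_info in tables_info:
--         table_name = table_info['table_name'].lower()
--         table_name_words = table_name.replace('_', ' ')
--
--         # Check if any query word is in table name
--         if any(word in table_name or word in table_name_words for word in query_words):
--             exact_matches.append(table_info)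
--         else:
--             other_matches.append(table_info)
--
--     # Combine: exact matches first, then others
--     reranked = exact_matches + other_matches
--
--     # Remove duplicates while preserving order
--     seen = set()
--     unique_tables = []
--     for t in reranked:
--         if t['table_name'] not in seen:
--             seen.add(t['table_name'])
--             unique_tables.append(t)
--
--     return unique_tables
-- ===== SOURCE B (Python) =====
-- def _rerank_tables(tables_info, query):
--     """Rerank retrieved tables based on exact name matches"""
--     query_words = set(query.lower().split())
--
--     def _matches(t):
--         name = t['table_name'].lower()
--         name_words = name.replace('_', ' ')
--         return any(word in name or word in name_words for word in query_words)
--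
--     # Deduplicate first (first occurrence wins), then one stable sort puts matches first.
--     seen = set()
--     deduped = []
--     for t in tables_info:
--         n = t['table_name']
--         if n not in seen:
--             seen.add(n)
--             deduped.append(t)
--
--     return sorted(deduped, key=lambda t: not _matches(t))
-- ===== Notes on version B (the rewrite author's own statement) =====
-- stated objective: simpler
-- what changed: Replaces A's two-bucket partition + concatenation + post-concat dedup with a single first-occurrence dedup pass followed by one stable sort on a boolean match key (matches first); equivalence holds because the match test depends only on the table_name used for dedup.
import Mathlib
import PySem

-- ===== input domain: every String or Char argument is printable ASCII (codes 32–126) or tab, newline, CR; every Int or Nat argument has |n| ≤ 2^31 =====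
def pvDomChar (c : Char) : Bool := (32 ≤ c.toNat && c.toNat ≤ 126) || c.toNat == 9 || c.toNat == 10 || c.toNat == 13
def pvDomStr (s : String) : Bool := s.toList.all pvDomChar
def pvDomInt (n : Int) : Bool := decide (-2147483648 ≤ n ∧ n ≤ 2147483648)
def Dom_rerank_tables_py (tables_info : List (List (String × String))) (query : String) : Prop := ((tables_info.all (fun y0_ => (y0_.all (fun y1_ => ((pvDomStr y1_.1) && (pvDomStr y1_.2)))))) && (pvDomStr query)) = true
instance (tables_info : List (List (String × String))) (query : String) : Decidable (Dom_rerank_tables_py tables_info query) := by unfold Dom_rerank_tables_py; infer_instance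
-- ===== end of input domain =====

-- B replaces A's two-bucket partition + concatenation + post-dedup by a first-occurrence dedup pass
-- followed by one stable sort on a boolean match key (objective: simpler; return value only, no mutation).

-- ===== PORT A =====
-- t['table_name'] (both versions); Pre_ guarantees the key is present, so getD "" is never taken.
def pvName (t : List (String × String)) : String :=
  ((PySem.Dict.mk t).get? "table_name").getD ""

-- loop body of A's partition loop
def pvStepA (query_words : PySem.Set String)
    (p : List (List (String × String)) × List (List (String × String)))
    (table_info : List (String × String)) :
    List (List (String × String)) × List (List (String × String)) :=
  let table_name := PySem.Str.lower (pvName table_info)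
  let table_name_words := PySem.Str.replace table_name "_" " "
  if query_words.any (fun word => PySem.Str.isIn word table_name || PySem.Str.isIn word table_name_words)
  then (p.1 ++ [table_info], p.2)
  else (p.1, p.2 ++ [table_info])

-- loop body of the dedup loop (textually identical in A and in Source B)
def pvDedupStep (p : PySem.Set String × List (List (String × String)))
    (t : List (String × String)) : PySem.Set String × List (List (String × String)) :=
  if p.1.contains (pvName t) then p else (p.1.add (pvName t), p.2 ++ [t])

def rerank_tables_py (tables_info : List (List (String × String))) (query : String) :
    List (List (String × String)) :=
  let query_words : PySem.Set String := PySem.Set.ofList (PySem.Str.split₀ (PySem.Str.lower query))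
  let eo := tables_info.foldl (pvStepA query_words) ([], [])
  let reranked := eo.1 ++ eo.2
  let su := reranked.foldl pvDedupStep (PySem.Set.empty, [])
  su.2

-- ===== PORT B =====
-- Source B's helper _matches(t)
def pvMatchesB (query_words : PySem.Set String) (t : List (String × String)) : Bool :=
  let name := PySem.Str.lower (pvName t)
  let name_words := PySem.Str.replace name "_" " "
  query_words.any (fun word => PySem.Str.isIn word name || PySem.Str.isIn word name_words)

def rerank_tables_py_alt (tables_info : List (List (String × String))) (query : String) :
    List (List (String × String)) :=
  let query_words : PySem.Set String := PySem.Set.ofList (PySem.Str.split₀ (PySem.Str.lower query))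
  let su := tables_info.foldl pvDedupStep (PySem.Set.empty, [])
  PySem.List.sorted su.2 (fun t => !pvMatchesB query_words t) false

-- ===== PRECONDITION & SPEC =====
-- Pre_ excludes only inputs where some table dict lacks the 'table_name' key: there A raises KeyError.
def Pre_rerank_tables_py (tables_info : List (List (String × String))) (query : String) : Prop :=
  ∀ t ∈ tables_info, ∃ p ∈ t, p.1 = "table_name"
instance (tables_info : List (List (String × String))) (query : String) : Decidable (Pre_rerank_tables_py tables_info query) := by unfold Pre_rerank_tables_py; infer_instance
def pvWitness_rerank_tables_py : (List (List (String × String))) × String :=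
  ([[("table_name", "users")], [("table_name", "orders")]], "users data")

def Spec_rerank_tables_py (tables_info : List (List (String × String))) (query : String) (out : List (List (String × String))) : Prop := out = rerank_tables_py_alt tables_info query
instance (tables_info : List (List (String × String))) (query : String) (out : List (List (String × String))) : Decidable (Spec_rerank_tables_py tables_info query out) := by unfold Spec_rerank_tables_py; infer_instance

-- ===== CLAIM (what is proved, stated in full; the proofs are below) =====
def Claim_equal_rerank_tables_py : Prop := ∀ (tables_info : List (List (String × String))) (query : String), Dom_rerank_tables_py tables_info query → Pre_rerank_tables_py tables_info query → Spec_rerank_tables_py tables_info query (rerank_tables_py tables_info query)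

-- ===== LEMMAS AND PROOFS =====

-- the match test as a function of the table NAME alone (both versions compute exactly this)
def pvMatchKey (qw : PySem.Set String) (nm : String) : Bool :=
  let name := PySem.Str.lower nm
  let name_words := PySem.Str.replace name "_" " "
  qw.any (fun word => PySem.Str.isIn word name || PySem.Str.isIn word name_words)

-- recursive renderings of the dedup fold: output list and final seen set
def pvDD (S : PySem.Set String) : List (List (String × String)) → List (List (String × String))
  | [] => []
  | t :: ts => if S.contains (pvName t) then pvDD S ts else t :: pvDD (S.add (pvName t)) ts

def pvSeen (S : PySem.Set String) : List (List (String × String)) → PySem.Set String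
  | [] => S
  | t :: ts => if S.contains (pvName t) then pvSeen S ts else pvSeen (S.add (pvName t)) ts

lemma pv_matchesB_eq (qw : PySem.Set String) (t : List (String × String)) :
    pvMatchesB qw t = pvMatchKey qw (pvName t) := rfl

lemma pv_stepA_eq (qw : PySem.Set String) (p) (t) :
    pvStepA qw p t = if pvMatchKey qw (pvName t) then (p.1 ++ [t], p.2) else (p.1, p.2 ++ [t]) := rfl


lemma pv_foldl_stepA (qw : PySem.Set String) (xs : List (List (String × String)))
    (as bs : List (List (String × String))) :
    xs.foldl (pvStepA qw) (as, bs) =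
      (as ++ xs.filter (fun t => pvMatchKey qw (pvName t)),
       bs ++ xs.filter (fun t => !pvMatchKey qw (pvName t))) := by
  induction xs generalizing as bs with
  | nil => simp
  | cons t ts ih =>
    simp only [List.foldl_cons, List.filter_cons, pv_stepA_eq]
    by_cases h : pvMatchKey qw (pvName t) = true
    · rw [if_pos h, ih]; simp [h]
    · rw [if_neg h, ih]
      simp only [Bool.not_eq_true] at h
      simp [h]


lemma pv_foldl_dedup (xs : List (List (String × String))) (S : PySem.Set String)
    (acc : List (List (String × String))) :
    xs.foldl pvDedupStep (S, acc) = (pvSeen S xs, acc ++ pvDD S xs) := by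
  induction xs generalizing S acc with
  | nil => simp [pvSeen, pvDD]
  | cons t ts ih =>
    simp only [List.foldl_cons, pvDedupStep, pvSeen, pvDD]
    by_cases h : S.contains (pvName t) = true
    · rw [if_pos h, if_pos h, if_pos h, ih]
    · rw [if_neg h, if_neg h, if_neg h, ih]; simp


lemma pv_dd_append (xs ys : List (List (String × String))) (S : PySem.Set String) :
    pvDD S (xs ++ ys) = pvDD S xs ++ pvDD (pvSeen S xs) ys := by
  induction xs generalizing S with
  | nil => simp [pvDD, pvSeen]
  | cons t ts ih =>
    simp only [List.cons_append, pvDD, pvSeen]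
    by_cases h : S.contains (pvName t) = true
    · rw [if_pos h, if_pos h, if_pos h, ih]
    · rw [if_neg h, if_neg h, if_neg h, ih]; simp


lemma pv_mem_seen (xs : List (List (String × String))) (S : PySem.Set String) (n : String) :
    n ∈ pvSeen S xs ↔ n ∈ S ∨ ∃ t ∈ xs, pvName t = n := by
  induction xs generalizing S with
  | nil => simp [pvSeen]
  | cons t ts ih =>
    simp only [pvSeen]
    by_cases h : S.contains (pvName t) = true
    · rw [if_pos h, ih]
      rw [PySem.Set.contains_iff] at h
      constructor
      · rintro (hS | ht); · exact Or.inl hS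
        · rcases ht with ⟨u, hu, hn⟩; exact Or.inr ⟨u, List.mem_cons_of_mem _ hu, hn⟩
      · rintro (hS | ⟨u, hu, hn⟩); · exact Or.inl hS
        · rcases List.mem_cons.mp hu with rfl | hu
          · exact Or.inl (hn ▸ h)
          · exact Or.inr ⟨u, hu, hn⟩
    · rw [if_neg h, ih, PySem.Set.mem_add]
      constructor
      · rintro ((hS | rfl) | ht)
        · exact Or.inl hS
        · exact Or.inr ⟨t, by simp⟩
        · rcases ht with ⟨u, hu, hn⟩; exact Or.inr ⟨u, by simp [hu], hn⟩
      · rintro (hS | ⟨u, hu, hn⟩)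
        · exact Or.inl (Or.inl hS)
        · rcases List.mem_cons.mp hu with rfl | hu
          · exact Or.inl (Or.inr hn.symm)
          · exact Or.inr ⟨u, hu, hn⟩


lemma pv_dd_filter (M : String → Bool) (xs : List (List (String × String)))
    (S S' : PySem.Set String)
    (h : ∀ n, M n = true → (n ∈ S ↔ n ∈ S')) :
    pvDD S (xs.filter (fun t => M (pvName t))) =
      (pvDD S' xs).filter (fun t => M (pvName t)) := by
  induction xs generalizing S S' with
  | nil => simp [pvDD]
  | cons t ts ih =>
    simp only [List.filter_cons, pvDD]
    by_cases hM : M (pvName t) = true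
    · have hc : S.contains (pvName t) = S'.contains (pvName t) := by
        by_cases hS : pvName t ∈ S'
        · rw [PySem.Set.contains_iff .. |>.symm] at hS
          rw [hS, (PySem.Set.contains_iff ..).mpr (((h _ hM).mpr ((PySem.Set.contains_iff ..).mp hS)))]
        · have : ¬ pvName t ∈ S := fun hx => hS ((h _ hM).mp hx)
          simp [PySem.Set.contains_eq_listContains, hS, this]
      rw [if_pos hM]
      by_cases hS' : S'.contains (pvName t) = true
      · rw [pvDD, hc, if_pos hS', if_pos hS', ih S S' h]
      · rw [pvDD, hc, if_neg hS', if_neg hS', List.filter_cons, if_pos hM]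
        rw [ih (S.add (pvName t)) (S'.add (pvName t)) (fun n hn => by
          rw [PySem.Set.mem_add, PySem.Set.mem_add, h n hn])]
    · rw [if_neg hM]
      by_cases hS' : S'.contains (pvName t) = true
      · rw [if_pos hS', ih S S' h]
      · rw [if_neg hS', List.filter_cons, if_neg hM]
        refine ih S (S'.add (pvName t)) (fun n hn => ?_)
        rw [PySem.Set.mem_add, h n hn]
        constructor
        · exact Or.inl
        · rintro (hx | rfl); · exact hx
          · exact absurd hn (by simp [hM])


lemma pv_insertBy_bool {α : Type} (k : α → Bool) (x : α) (as bs : List α)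
    (ha : ∀ a ∈ as, k a = false) (hb : ∀ b ∈ bs, k b = true) :
    PySem.List.insertBy (fun a b => decide (k a < k b)) x (as ++ bs) =
      if k x then (as ++ bs) ++ [x] else (as ++ [x]) ++ bs := by
  by_cases hx : k x = true
  · rw [if_pos hx, PySem.List.insertBy_of_forall_not_before]
    intro y _; simp [hx]
  · rw [if_neg hx]
    simp only [Bool.not_eq_true] at hx
    induction as with
    | nil =>
      simp only [List.nil_append]
      cases bs with
      | nil => simp [PySem.List.insertBy]
      | cons b bt =>
        rw [PySem.List.insertBy]
        rw [if_pos (by simp [hx, hb b (by simp)])]; rfl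
    | cons a at' iha =>
      rw [List.cons_append, PySem.List.insertBy,
        if_neg (by simp [ha a (by simp)]), iha (fun a ha' => ha a (by simp [ha']))]
      simp


lemma pv_foldl_insertBy_bool {α : Type} (k : α → Bool) (xs as bs : List α)
    (ha : ∀ a ∈ as, k a = false) (hb : ∀ b ∈ bs, k b = true) :
    xs.foldl (fun acc x => PySem.List.insertBy (fun a b => decide (k a < k b)) x acc) (as ++ bs) =
      (as ++ xs.filter (fun x => !k x)) ++ (bs ++ xs.filter k) := by
  induction xs generalizing as bs with
  | nil => simp
  | cons x ts ih =>
    rw [List.foldl_cons, pv_insertBy_bool k x as bs ha hb]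
    by_cases hx : k x = true
    · rw [if_pos hx, List.append_assoc as bs]
      rw [ih as (bs ++ [x]) ha (by intro b hbm; rcases List.mem_append.mp hbm with h|h
                                   · exact hb b h
                                   · simp at h; subst h; exact hx)]
      simp [hx]
    · rw [if_neg hx]
      simp only [Bool.not_eq_true] at hx
      rw [ih (as ++ [x]) bs (by intro a ham; rcases List.mem_append.mp ham with h|h
                                · exact ha a h
                                · simp at h; subst h; exact hx) hb]
      simp [hx]


lemma pv_sorted_bool {α : Type} (k : α → Bool) (xs : List α) :
    PySem.List.sorted xs k false = xs.filter (fun x => !k x) ++ xs.filter k := by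
  rw [PySem.List.sorted_eq_foldl_insertBy]
  have := pv_foldl_insertBy_bool k xs [] [] (by simp) (by simp)
  simpa using this


-- ===== VERDICT (by name: the statement is the Claim_ definition above) =====
theorem rerank_tables_py_spec : Claim_equal_rerank_tables_py := by
  intro xs q _ _
  show rerank_tables_py xs q = rerank_tables_py_alt xs q
  unfold rerank_tables_py rerank_tables_py_alt
  simp only [pv_foldl_stepA, pv_foldl_dedup, pv_matchesB_eq, List.nil_append]
  set qw := PySem.Set.ofList (PySem.Str.split₀ (PySem.Str.lower q)) with hqw
  rw [pv_dd_append, pv_sorted_bool]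
  have h1 : pvDD PySem.Set.empty (xs.filter (fun t => pvMatchKey qw (pvName t)))
      = (pvDD PySem.Set.empty xs).filter (fun t => pvMatchKey qw (pvName t)) :=
    pv_dd_filter (fun nm => pvMatchKey qw nm) xs _ _ (fun n _ => Iff.rfl)
  have h2 : pvDD (pvSeen PySem.Set.empty (xs.filter (fun t => pvMatchKey qw (pvName t))))
        (xs.filter (fun t => !pvMatchKey qw (pvName t)))
      = (pvDD PySem.Set.empty xs).filter (fun t => !pvMatchKey qw (pvName t)) := by
    refine pv_dd_filter (fun nm => !pvMatchKey qw nm) xs _ PySem.Set.empty (fun n hn => ?_)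
    simp only [Bool.not_eq_eq_eq_not, Bool.not_true] at hn
    rw [pv_mem_seen]
    constructor
    · rintro (he | ⟨t, ht, rfl⟩)
      · exact he
      · have := List.of_mem_filter ht
        simp [hn] at this
    · intro he; exact Or.inl he
  rw [h1, h2]
  simp
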